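-- pv_equiv track=rewrite | github.com/raviiprakash6/DS | venv/DataStructure/Array/maxEvenOdd.py | maxEvenOdd
-- ===== SOURCE A (Python) =====
-- def maxEvenOdd(arr,c=1):
--     """This function will return you longest length of  contiguous even and odd number"""
--     n=len(arr)
--     b=1
--     if(c<=n-1):
--         for i in range(c,n):
--             if((arr[i-1]%2==0 and arr[i]%2!=0) or
--                (arr[i-1]%2!=0 and arr[i]%2==0)):
--                 b=b+1
--                 c=i+1
--             else:
--                 c=i+1
--                 break;
--     else:
--         #When number of element in list1 is 1 function will diectly come out from this return
--         return 1
--     return max(b,maxEvenOdd(arr,c))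
-- ===== SOURCE B (Python) =====
-- def maxEvenOdd(arr, c=1):
--     """Single linear scan maintaining the current alternating-run length and the best seen."""
--     n = len(arr)
--     if c > n - 1:
--         return 1
--     best = 1
--     cur = 1
--     for i in range(c, n):
--         if arr[i - 1] % 2 != arr[i] % 2:
--             cur += 1
--         else:
--             cur = 1
--         if cur > best:
--             best = cur
--     return best
-- ===== Notes on version B (the rewrite author's own statement) =====
-- stated objective: simpler
-- what changed: Replaces A's break-then-recurse segmentation (a loop that breaks at each parity repeat and a recursive call restarting there) by a single iterative scan maintaining the current alternating-run length and the best so far.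
import Mathlib
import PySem

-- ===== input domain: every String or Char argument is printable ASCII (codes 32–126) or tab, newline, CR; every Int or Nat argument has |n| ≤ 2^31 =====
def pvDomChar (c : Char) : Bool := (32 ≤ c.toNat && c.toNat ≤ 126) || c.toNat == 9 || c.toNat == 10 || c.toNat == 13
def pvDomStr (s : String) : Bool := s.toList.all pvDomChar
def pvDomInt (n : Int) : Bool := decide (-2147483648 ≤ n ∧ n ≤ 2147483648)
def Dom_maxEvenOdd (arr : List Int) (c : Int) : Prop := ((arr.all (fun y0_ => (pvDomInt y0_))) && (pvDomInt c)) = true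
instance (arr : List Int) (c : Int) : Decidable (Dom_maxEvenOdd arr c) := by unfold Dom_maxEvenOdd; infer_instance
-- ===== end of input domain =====

-- B replaces A's break-and-recurse structure by one linear scan keeping (best, current run length); same O(n) cost, simpler shape.

-- ===== PORT A =====
-- the 'for i in range(c,n)' loop of A: state (b, c); returns early ('break') when the parity stops alternating
def pvLoopA (arr : List Int) : List Int → Int → Int → Int × Int
  | [], b, c => (b, c)
  | i :: rest, b, c =>
    if (PySem.Int.mod (PySem.List.pyGetD arr (i - 1) 0) 2 = 0 ∧ PySem.Int.mod (PySem.List.pyGetD arr i 0) 2 ≠ 0) ∨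
       (PySem.Int.mod (PySem.List.pyGetD arr (i - 1) 0) 2 ≠ 0 ∧ PySem.Int.mod (PySem.List.pyGetD arr i 0) 2 = 0)
    then pvLoopA arr rest (b + 1) (i + 1)
    else (b, i + 1)

-- (termination helper for the port, cited by decreasing_by)
lemma pvLoopA_snd_lb (arr : List Int) : ∀ (l : List Int) (b c m : Int), m ≤ c → (∀ i ∈ l, m ≤ i + 1) → m ≤ (pvLoopA arr l b c).2 := by
  intro l
  induction l with
  | nil => intro b c m h _; simpa [pvLoopA] using h
  | cons i rest ih =>
    intro b c m h hm
    simp only [pvLoopA]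
    split
    · exact ih (b + 1) (i + 1) m (hm i (by simp)) (fun j hj => hm j (by simp [hj]))
    · exact hm i (by simp)

lemma pvLoopA_range_snd (arr : List Int) (c n : Int) (h : c < n) :
    c + 1 ≤ (pvLoopA arr (PySem.List.pyRange c n 1) 1 c).2 := by
  rw [PySem.List.pyRange_one_cons h]
  simp only [pvLoopA]
  split
  · exact pvLoopA_snd_lb arr _ 2 (c + 1) (c + 1) le_rfl
      (fun j hj => by have := (PySem.List.mem_pyRange_one.1 hj).1; omega)
  · omega

def maxEvenOdd (arr : List Int) (c : Int) : Int :=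
  if c ≤ (arr.length : Int) - 1 then
    let r := pvLoopA arr (PySem.List.pyRange c (arr.length : Int) 1) 1 c
    max r.1 (maxEvenOdd arr r.2)
  else 1
termination_by ((arr.length : Int) - c).toNat
decreasing_by
  have := pvLoopA_range_snd arr c (arr.length : Int) (by omega)
  omega

-- ===== PORT B =====
-- the scan of B: state (best, cur)
def pvScanB (arr : List Int) : List Int → Int → Int → Int
  | [], best, _ => best
  | i :: rest, best, cur =>
    let cur' := if PySem.Int.mod (PySem.List.pyGetD arr (i - 1) 0) 2 ≠ PySem.Int.mod (PySem.List.pyGetD arr i 0) 2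
                then cur + 1 else 1
    pvScanB arr rest (if best < cur' then cur' else best) cur'

def maxEvenOdd_alt (arr : List Int) (c : Int) : Int :=
  if (arr.length : Int) - 1 < c then 1
  else pvScanB arr (PySem.List.pyRange c (arr.length : Int) 1) 1 1

-- ===== PRECONDITION & SPEC =====
-- Pre_ excludes exactly the inputs where Python A raises IndexError: when the loop runs (c ≤ n-1)
-- its first access arr[c-1] needs c-1 ≥ -n, i.e. 1 - n ≤ c.
def Pre_maxEvenOdd (arr : List Int) (c : Int) : Prop :=
  c ≤ (arr.length : Int) - 1 → 1 - (arr.length : Int) ≤ c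
instance (arr : List Int) (c : Int) : Decidable (Pre_maxEvenOdd arr c) := by unfold Pre_maxEvenOdd; infer_instance
def pvWitness_maxEvenOdd : List Int × Int := ([2, 3, 4], 1)

def Spec_maxEvenOdd (arr : List Int) (c : Int) (out : Int) : Prop := out = maxEvenOdd_alt arr c
instance (arr : List Int) (c : Int) (out : Int) : Decidable (Spec_maxEvenOdd arr c out) := by unfold Spec_maxEvenOdd; infer_instance

-- ===== CLAIM (what is proved, stated in full; the proofs are below) =====
def Claim_equal_maxEvenOdd : Prop := ∀ (arr : List Int) (c : Int), Dom_maxEvenOdd arr c → Pre_maxEvenOdd arr c → Spec_maxEvenOdd arr c (maxEvenOdd arr c)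

-- ===== LEMMAS AND PROOFS =====

-- A's or-of-ands parity test is the same as B's '%2 ≠ %2' test (both residues lie in {0,1})
lemma pvCond_iff (arr : List Int) (i : Int) :
    ((PySem.Int.mod (PySem.List.pyGetD arr (i - 1) 0) 2 = 0 ∧ PySem.Int.mod (PySem.List.pyGetD arr i 0) 2 ≠ 0) ∨
     (PySem.Int.mod (PySem.List.pyGetD arr (i - 1) 0) 2 ≠ 0 ∧ PySem.Int.mod (PySem.List.pyGetD arr i 0) 2 = 0)) ↔
    PySem.Int.mod (PySem.List.pyGetD arr (i - 1) 0) 2 ≠ PySem.Int.mod (PySem.List.pyGetD arr i 0) 2 := by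
  have h1 := PySem.Int.mod_nonneg (PySem.List.pyGetD arr (i - 1) 0) (by norm_num : (0:Int) < 2)
  have h2 := PySem.Int.mod_lt (PySem.List.pyGetD arr (i - 1) 0) (by norm_num : (0:Int) < 2)
  have h3 := PySem.Int.mod_nonneg (PySem.List.pyGetD arr i 0) (by norm_num : (0:Int) < 2)
  have h4 := PySem.Int.mod_lt (PySem.List.pyGetD arr i 0) (by norm_num : (0:Int) < 2)
  omega

-- a 'best' ≥ 1 carried through the scan can be pulled out as an outer max
lemma pvScanB_best (arr : List Int) : ∀ (l : List Int) (best cur : Int), 1 ≤ best →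
    pvScanB arr l best cur = max best (pvScanB arr l 1 cur) := by
  intro l
  induction l with
  | nil => intro best cur h; simp [pvScanB]; omega
  | cons i rest ih =>
    intro best cur h
    simp only [pvScanB]
    set cur' := if PySem.Int.mod (PySem.List.pyGetD arr (i - 1) 0) 2 ≠ PySem.Int.mod (PySem.List.pyGetD arr i 0) 2
                then cur + 1 else 1 with hcur
    rw [ih _ cur' (by split <;> omega),
        ih (if (1:Int) < cur' then cur' else 1) cur' (by split <;> omega)]
    omega

-- main loop correspondence: on a nonempty tail range, B's scan started at (k, k) computes
-- exactly A's 'max b (recursive call)' with the loop started at b = k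
lemma pvMain (arr : List Int) : ∀ (l : List Int) (c : Int),
    l = PySem.List.pyRange c (arr.length : Int) 1 → l ≠ [] → ∀ k : Int, 1 ≤ k →
    pvScanB arr l k k = max (pvLoopA arr l k c).1 (maxEvenOdd arr (pvLoopA arr l k c).2) := by
  intro l
  induction l with
  | nil => intro c _ hne; exact absurd rfl hne
  | cons i rest ih =>
    intro c hl _ k hk
    have hcn : c < (arr.length : Int) := by
      by_contra h
      rw [PySem.List.pyRange_one_eq_nil (by omega)] at hl
      exact (List.cons_ne_nil i rest) hl
    rw [PySem.List.pyRange_one_cons hcn] at hl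
    injection hl with hi hrest
    subst hi
    by_cases halt : PySem.Int.mod (PySem.List.pyGetD arr (i - 1) 0) 2 ≠ PySem.Int.mod (PySem.List.pyGetD arr i 0) 2
    · -- alternating step
      simp only [pvScanB, pvLoopA, if_pos halt, if_pos ((pvCond_iff arr i).2 halt), if_pos (by omega : k < k + 1)]
      rcases eq_or_ne rest [] with hre | hre
      · subst hre
        have hn : (arr.length : Int) ≤ i + 1 := by
          by_contra h
          rw [PySem.List.pyRange_one_cons (by omega)] at hrest
          exact (List.cons_ne_nil _ _) hrest.symm
        rw [maxEvenOdd]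
        simp only [pvScanB, pvLoopA, if_neg (by omega : ¬ (i + 1 ≤ (arr.length : Int) - 1))]
        omega
      · exact ih (i + 1) hrest hre (k + 1) (by omega)
    · -- run breaks at i
      simp only [pvScanB, pvLoopA, if_neg halt, if_neg (fun h => halt ((pvCond_iff arr i).1 h)),
        if_neg (by omega : ¬ k < 1)]
      rcases eq_or_ne rest [] with hre | hre
      · subst hre
        have hn : (arr.length : Int) ≤ i + 1 := by
          by_contra h
          rw [PySem.List.pyRange_one_cons (by omega)] at hrest
          exact (List.cons_ne_nil _ _) hrest.symm
        rw [maxEvenOdd]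
        simp only [pvScanB, if_neg (by omega : ¬ (i + 1 ≤ (arr.length : Int) - 1))]
        omega
      · have hlt : i + 1 < (arr.length : Int) := by
          by_contra h
          rw [PySem.List.pyRange_one_eq_nil (by omega)] at hrest
          exact hre hrest
        have hrec : maxEvenOdd arr (i + 1) = pvScanB arr rest 1 1 := by
          rw [maxEvenOdd]
          simp only [if_pos (by omega : i + 1 ≤ (arr.length : Int) - 1)]
          rw [← hrest, ih (i + 1) hrest hre 1 le_rfl]
        rw [pvScanB_best arr rest k 1 hk, hrec]

-- ===== VERDICT (by name: the statement is the Claim_ definition above) =====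
theorem maxEvenOdd_spec : Claim_equal_maxEvenOdd := by
  intro arr c _ _
  unfold Spec_maxEvenOdd maxEvenOdd_alt
  by_cases h : c ≤ (arr.length : Int) - 1
  · rw [maxEvenOdd]
    simp only [if_pos h, if_neg (by omega : ¬ (arr.length : Int) - 1 < c)]
    exact (pvMain arr _ c rfl (by
      rw [PySem.List.pyRange_one_cons (by omega : c < (arr.length : Int))]
      exact List.cons_ne_nil _ _) 1 le_rfl).symm
  · rw [maxEvenOdd]
    simp only [if_neg h, if_pos (by omega : (arr.length : Int) - 1 < c)]
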